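-- pv_equiv track=rewrite | github.com/K1Green/comfyui-metadata-nodes | ffpy_exiftool_node.py | _build_debug_log_success
-- ===== SOURCE A (Python) =====
-- from typing import Optional, Dict, Any, List
--
-- def _build_debug_log_success(
--
--     metadata: Dict[str, Any],
--     operation: str,
-- ) -> str:
--     """Build success section of debug log."""
--     log = "\n"
--     log += "[OK] Operation completed successfully\n"
--
--     if operation.startswith("Read"):
--         log += f"Total fields extracted: {len(metadata)}\n"
--
--         # Count by group
--         groups = {}
--         for key in metadata.keys():
--             if ":" in key:
--                 group = key.split(":")[0]
--                 groups[group] = groups.get(group, 0) + 1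
--
--         if groups:
--             log += "\nBreakdown by group:\n"
--             for group, count in sorted(groups.items()):
--                 log += f"  {group}: {count} fields\n"
--
--     elif operation == "Write Metadata":
--         log += "Metadata written and verified successfully\n"
--
--     log += "=" * 55 + "\n"
--
--     return log
-- ===== SOURCE B (Python) =====
-- def _build_debug_log_success(metadata, operation):
--     """Build success section of debug log (sort-then-run-scan instead of dict accumulation)."""
--     log = "\n"
--     log += "[OK] Operation completed successfully\n"
--
--     if operation.startswith("Read"):
--         log += f"Total fields extracted: {len(metadata)}\n"
--
--         prefixes = sorted(k.split(":")[0] for k in metadata if ":" in k)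
--
--         # run-length scan over the sorted prefixes: groups come out already sorted
--         runs = []
--         i = 0
--         n = len(prefixes)
--         while i < n:
--             j = i
--             while j < n and prefixes[j] == prefixes[i]:
--                 j += 1
--             runs.append((prefixes[i], j - i))
--             i = j
--
--         if prefixes:
--             log += "\nBreakdown by group:\n"
--             for group, count in runs:
--                 log += f"  {group}: {count} fields\n"
--
--     elif operation == "Write Metadata":
--         log += "Metadata written and verified successfully\n"
--
--     log += "=" * 55 + "\n"
--     return log
-- ===== Notes on version B (the rewrite author's own statement) =====
-- stated objective: alternative
-- what changed: Replaces A's dict-accumulate-then-sort-items group counting by collecting all ':'-prefixes, sorting them once, and emitting (group, count) pairs with a linear run-length scan over the sorted list; the outer log formatting is unchanged.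
import Mathlib
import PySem

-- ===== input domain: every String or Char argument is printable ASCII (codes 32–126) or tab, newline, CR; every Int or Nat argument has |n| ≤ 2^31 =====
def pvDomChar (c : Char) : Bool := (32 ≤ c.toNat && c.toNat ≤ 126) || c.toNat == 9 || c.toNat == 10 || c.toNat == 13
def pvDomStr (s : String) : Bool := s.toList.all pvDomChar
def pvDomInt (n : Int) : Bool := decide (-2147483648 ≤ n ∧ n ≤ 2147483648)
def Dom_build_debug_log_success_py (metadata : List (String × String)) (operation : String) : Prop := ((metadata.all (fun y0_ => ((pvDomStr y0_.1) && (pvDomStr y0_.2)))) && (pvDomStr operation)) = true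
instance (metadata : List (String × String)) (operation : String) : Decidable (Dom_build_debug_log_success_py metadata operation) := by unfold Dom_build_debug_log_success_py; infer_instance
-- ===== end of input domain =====

-- B replaces A's dict-accumulate-then-sort-items group counting by sorting the ':'-prefixes once and
-- run-length-scanning the sorted list (same cost, different algorithm); outer formatting is unchanged.

-- ===== PORT A =====
-- shared trivial helper: key.split(":")[0] (split? is some for a nonempty separator; the [0] index
-- always exists since split returns at least one piece, so the defaults are never used)
def pvPrefix (k : String) : String :=
  PySem.List.pyGetD ((PySem.Str.split? k ":").getD []) 0 ""

-- "=" * 55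
def pvEq55 : String := "======================================================="

-- A's loop body: groups[group] = groups.get(group, 0) + 1 (guarded by ":" in key)
def pvAccA (g : PySem.Dict String Int) (key : String) : PySem.Dict String Int :=
  if PySem.Str.isIn ":" key then g.insert (pvPrefix key) (g.getD (pvPrefix key) 0 + 1) else g

def build_debug_log_success_py (metadata : List (String × String)) (operation : String) : String :=
  let log := "\n"
  let log := log ++ "[OK] Operation completed successfully\n"
  let d := PySem.Dict.ofList metadata
  let log :=
    if PySem.Str.startswith operation "Read" then
      let log := log ++ "Total fields extracted: " ++ PySem.Int.toStr (d.size : Int) ++ "\n"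
      let groups := d.keys.foldl pvAccA PySem.Dict.empty
      if groups.items = [] then log
      else
        (PySem.List.sorted2 groups.items Prod.fst Prod.snd false).foldl
          (fun l p => l ++ "  " ++ p.1 ++ ": " ++ PySem.Int.toStr p.2 ++ " fields\n")
          (log ++ "\nBreakdown by group:\n")
    else if operation = "Write Metadata" then
      log ++ "Metadata written and verified successfully\n"
    else log
  log ++ pvEq55 ++ "\n"

-- ===== PORT B =====
-- B's comprehension: k.split(":")[0] for k in metadata if ":" in k
def pvPf (k : String) : Option String :=
  if PySem.Str.isIn ":" k then some (pvPrefix k) else none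

-- run-length scan over a list (Source B's while loop: inner scan = takeWhile, skip = dropWhile)
def pvRuns : List String → List (String × Int)
  | [] => []
  | x :: xs =>
      (x, ((xs.takeWhile (fun y => y == x)).length + 1 : Nat)) ::
        pvRuns (xs.dropWhile (fun y => y == x))
termination_by l => l.length
decreasing_by
  exact Nat.lt_succ_of_le (List.length_dropWhile_le _ _)

def build_debug_log_success_py_alt (metadata : List (String × String)) (operation : String) : String :=
  let log := "\n"
  let log := log ++ "[OK] Operation completed successfully\n"
  let log :=
    if PySem.Str.startswith operation "Read" then
      let log := log ++ "Total fields extracted: " ++ PySem.Int.toStr ((PySem.Dict.ofList metadata).size : Int) ++ "\n"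
      let prefixes := PySem.List.sorted ((PySem.Dict.ofList metadata).keys.filterMap pvPf) (fun x => x) false
      let runs := pvRuns prefixes
      if prefixes = [] then log
      else
        runs.foldl
          (fun l p => l ++ "  " ++ p.1 ++ ": " ++ PySem.Int.toStr p.2 ++ " fields\n")
          (log ++ "\nBreakdown by group:\n")
    else if operation = "Write Metadata" then
      log ++ "Metadata written and verified successfully\n"
    else log
  log ++ pvEq55 ++ "\n"

-- ===== PRECONDITION & SPEC =====
def Spec_build_debug_log_success_py (metadata : List (String × String)) (operation : String) (out : String) : Prop := out = build_debug_log_success_py_alt metadata operation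
instance (metadata : List (String × String)) (operation : String) (out : String) : Decidable (Spec_build_debug_log_success_py metadata operation out) := by unfold Spec_build_debug_log_success_py; infer_instance

-- ===== CLAIM (what is proved, stated in full; the proofs are below) =====
def Claim_equal_build_debug_log_success_py : Prop := ∀ (metadata : List (String × String)) (operation : String), Dom_build_debug_log_success_py metadata operation → Spec_build_debug_log_success_py metadata operation (build_debug_log_success_py metadata operation)

-- ===== LEMMAS AND PROOFS =====

-- A's accumulation loop over the raw keys is the counter of the filtered-mapped prefix list
theorem pv_foldl_eq_counter (ks : List String) :
    ks.foldl pvAccA PySem.Dict.empty = PySem.Dict.counter (ks.filterMap pvPf) := by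
  rw [← PySem.Dict.foldl_insert_getD_add_one_eq_counter]
  suffices h : ∀ (d : PySem.Dict String Int),
      ks.foldl pvAccA d = (ks.filterMap pvPf).foldl (fun g x => g.insert x (g.getD x 0 + 1)) d
    from h _
  induction ks with
  | nil => intro d; rfl
  | cons k ks ih =>
      intro d
      by_cases hk : PySem.Str.isIn ":" k = true
      · have h1 : pvAccA d k = d.insert (pvPrefix k) (d.getD (pvPrefix k) 0 + 1) := by
          rw [pvAccA, if_pos hk]
        have h2 : pvPf k = some (pvPrefix k) := by rw [pvPf, if_pos hk]
        simp only [List.filterMap_cons, h2, List.foldl_cons, h1, ih]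
      · have h1 : pvAccA d k = d := by rw [pvAccA, if_neg hk]
        have h2 : pvPf k = none := by rw [pvPf, if_neg hk]
        simp only [List.filterMap_cons, h2, List.foldl_cons, h1, ih]

-- on a (≤)-sorted list, the length of the equal-to-head prefix is the head's multiplicity
theorem pv_takeWhile_count (x : String) (xs : List String)
    (hx : ∀ y ∈ xs, x ≤ y) (hp : xs.Pairwise (· ≤ ·)) :
    (xs.takeWhile (fun y => y == x)).length = xs.count x := by
  induction xs with
  | nil => rfl
  | cons y ys ih =>
      rcases List.pairwise_cons.1 hp with ⟨hy, hp'⟩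
      by_cases hyx : y = x
      · subst hyx
        simp only [List.takeWhile_cons, beq_self_eq_true, if_pos, List.length_cons,
          List.count_cons_self]
        rw [ih (fun z hz => hx z (List.mem_cons_of_mem _ hz)) hp']
      · have hxy : x < y := lt_of_le_of_ne (hx y List.mem_cons_self) (Ne.symm hyx)
        have hnot : x ∉ y :: ys := by
          intro hmem
          rcases List.mem_cons.1 hmem with h | h
          · exact hyx h.symm
          · exact absurd (lt_of_lt_of_le hxy (hy x h)) (lt_irrefl x)
        rw [List.count_eq_zero.2 hnot]
        simp [hyx]

-- ofList is a sublist (keeps first occurrences in order)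
theorem pv_ofList_sublist {α : Type} [BEq α] [LawfulBEq α] (l : List α) :
    (PySem.Set.ofList l).Sublist l := by
  induction l with
  | nil => simp [PySem.Set.ofList, PySem.Set.empty]
  | cons x xs ih =>
      rw [PySem.Set.ofList_cons]
      exact List.Sublist.cons₂ x ((List.filter_sublist).trans ih)

-- dedup of a (≤)-sorted list is strictly increasing
theorem pv_ofList_pairwise_lt (ss : List String) (h : ss.Pairwise (· ≤ ·)) :
    (PySem.Set.ofList ss).Pairwise (· < ·) := by
  have hle : (PySem.Set.ofList ss).Pairwise (· ≤ ·) := h.sublist (pv_ofList_sublist ss)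
  have hne : (PySem.Set.ofList ss).Pairwise (· ≠ ·) := PySem.Set.nodup_ofList ss
  exact (hle.and hne).imp (fun hab => lt_of_le_of_ne hab.1 hab.2)

theorem pv_discard_of_not_mem {α : Type} [BEq α] [LawfulBEq α] (s : PySem.Set α) (x : α)
    (h : x ∉ s) : s.discard x = s :=
  List.filter_eq_self.2 (fun a ha => by simp; exact fun hax => h (hax ▸ ha))

-- a duplicated head collapses in the dedup list
theorem pv_ofList_cons_cons {α : Type} [BEq α] [LawfulBEq α] (x : α) (l : List α) :
    PySem.Set.ofList (x :: x :: l) = PySem.Set.ofList (x :: l) := by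
  simp [PySem.Set.ofList_cons, PySem.Set.discard, List.filter_filter]

-- a whole block of copies of the head collapses
theorem pv_ofList_block (x : String) (tw dw : List String) (htw : ∀ y ∈ tw, y = x) :
    PySem.Set.ofList (x :: (tw ++ dw)) = PySem.Set.ofList (x :: dw) := by
  induction tw with
  | nil => rfl
  | cons y tws ih =>
      have hyx : y = x := htw y List.mem_cons_self
      subst hyx
      rw [show (y :: tws) ++ dw = y :: (tws ++ dw) from rfl, pv_ofList_cons_cons]
      exact ih (fun z hz => htw z (List.mem_cons_of_mem _ hz))

-- run-length scan of a (≤)-sorted list = dedup paired with multiplicities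
theorem pv_pvRuns_sorted (ss : List String) (h : ss.Pairwise (· ≤ ·)) :
    pvRuns ss = (PySem.Set.ofList ss).map (fun g => (g, (ss.count g : Int))) := by
  match ss with
  | [] => simp [pvRuns, PySem.Set.ofList, PySem.Set.empty]
  | x :: xs =>
    rcases List.pairwise_cons.1 h with ⟨hx, hp⟩
    have hsplit : xs.takeWhile (fun y => y == x) ++ xs.dropWhile (fun y => y == x) = xs :=
      List.takeWhile_append_dropWhile
    have htw : ∀ y ∈ xs.takeWhile (fun y => y == x), y = x :=
      fun y hy => eq_of_beq (List.mem_takeWhile_imp (p := fun y => y == x) hy)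
    have hp_dw : (xs.dropWhile (fun y => y == x)).Pairwise (· ≤ ·) :=
      hp.sublist (List.dropWhile_sublist _)
    have hcount : (xs.takeWhile (fun y => y == x)).length = xs.count x :=
      pv_takeWhile_count x xs hx hp
    have htw_cnt : (xs.takeWhile (fun y => y == x)).count x
        = (xs.takeWhile (fun y => y == x)).length := by
      rw [List.count_eq_length]
      intro y hy; exact (htw y hy) ▸ rfl
    have hxdw : x ∉ xs.dropWhile (fun y => y == x) := by
      have hc : xs.count x = (xs.takeWhile (fun y => y == x)).count x
          + (xs.dropWhile (fun y => y == x)).count x := by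
        rw [← List.count_append, hsplit]
      rw [htw_cnt, hcount] at hc
      exact List.count_eq_zero.1 (by omega)
    have hofList : PySem.Set.ofList (x :: xs)
        = x :: PySem.Set.ofList (xs.dropWhile (fun y => y == x)) := by
      rw [show x :: xs = x :: (xs.takeWhile (fun y => y == x) ++ xs.dropWhile (fun y => y == x))
            from by rw [hsplit],
        pv_ofList_block x _ _ htw, PySem.Set.ofList_cons,
        pv_discard_of_not_mem _ _ (fun hmem => hxdw ((PySem.Set.mem_ofList _ x).1 hmem))]
    have ih := pv_pvRuns_sorted (xs.dropWhile (fun y => y == x)) hp_dw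
    rw [pvRuns, hofList]
    simp only [List.map_cons]
    rw [List.cons_eq_cons]
    refine ⟨?_, ?_⟩
    · rw [List.count_cons_self, ← hcount]
    · rw [ih]
      apply List.map_congr_left
      intro g hg
      have hgdw : g ∈ xs.dropWhile (fun y => y == x) := (PySem.Set.mem_ofList _ g).1 hg
      have hgx : g ≠ x := fun hgx => hxdw (hgx ▸ hgdw)
      have hcg : (x :: xs).count g = (xs.dropWhile (fun y => y == x)).count g := by
        rw [List.count_cons_of_ne hgx.symm]
        conv_lhs => rw [← hsplit]
        rw [List.count_append, List.count_eq_zero.2 (fun hmem => hgx (htw g hmem)),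
          Nat.zero_add]
      rw [hcg]
termination_by ss.length
decreasing_by exact Nat.lt_succ_of_le (List.length_dropWhile_le _ _)

-- sorted2 with keys (fst, snd) is sorted with the lexicographic key
theorem pv_sorted2_eq_sorted_lex (xs : List (String × Int)) :
    PySem.List.sorted2 xs Prod.fst Prod.snd false
      = PySem.List.sorted xs (fun p => toLex (p.1, p.2)) false := by
  have hbefore : (fun (a b : String × Int) =>
        decide (a.1 < b.1) || (!decide (b.1 < a.1) && decide (a.2 < b.2)))
      = (fun (a b : String × Int) => decide (toLex (a.1, a.2) < toLex (b.1, b.2))) := by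
    funext a b
    rw [Bool.eq_iff_iff]
    simp only [Bool.or_eq_true, Bool.and_eq_true, Bool.not_eq_true', decide_eq_true_eq,
      decide_eq_false_iff_not, Prod.Lex.lt_iff, ofLex_toLex]
    constructor
    · rintro (h1 | ⟨h2, h3⟩)
      · exact Or.inl h1
      · rcases lt_trichotomy a.1 b.1 with h | h | h
        · exact Or.inl h
        · exact Or.inr ⟨h, h3⟩
        · exact absurd h h2
    · rintro (h1 | ⟨h2, h3⟩)
      · exact Or.inl h1
      · exact Or.inr ⟨by rw [h2]; exact lt_irrefl _, h3⟩
  unfold PySem.List.sorted2 PySem.List.sorted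
  simp only [Bool.false_eq_true, if_false]
  congr 1
  rw [hbefore]

-- the main bridge: A's sorted dict items = B's run-length scan of the sorted prefixes
theorem pv_groups_eq (ks : List String) :
    PySem.List.sorted2 ((ks.foldl pvAccA PySem.Dict.empty).items) Prod.fst Prod.snd false
    = pvRuns (PySem.List.sorted (ks.filterMap pvPf) (fun x => x) false) := by
  rw [pv_foldl_eq_counter, PySem.Dict.items_counter]
  set ps := ks.filterMap pvPf with hps
  have hsp : (PySem.List.sorted ps (fun x => x) false).Pairwise (· ≤ ·) :=
    PySem.List.sorted_pairwise ps (fun x => x)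
  rw [pv_pvRuns_sorted _ hsp, pv_sorted2_eq_sorted_lex]
  have hcnt : ∀ g ∈ PySem.Set.ofList (PySem.List.sorted ps (fun x => x) false),
      (fun g => (g, ((PySem.List.sorted ps (fun x => x) false).count g : Int))) g
        = (fun g => (g, (ps.count g : Int))) g := by
    intro g _
    simp only
    rw [(PySem.List.sorted_perm ps (fun x => x) false).count_eq g]
  rw [List.map_congr_left hcnt]
  apply PySem.List.sorted_eq_of_perm_of_pairwise_lt
  · -- permutation
    apply List.Perm.map
    rw [List.perm_ext_iff_of_nodup (PySem.Set.nodup_ofList _) (PySem.Set.nodup_ofList _)]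
    intro a
    rw [PySem.Set.mem_ofList, PySem.Set.mem_ofList, PySem.List.mem_sorted]
  · -- strictly increasing under the lex key
    rw [List.pairwise_map]
    apply (pv_ofList_pairwise_lt _ hsp).imp
    intro a b hab
    exact Prod.Lex.lt_iff.2 (Or.inl hab)

-- the nonemptiness guards agree
theorem pv_guard_eq (ks : List String) :
    ((ks.foldl pvAccA PySem.Dict.empty).items = [])
    ↔ (PySem.List.sorted (ks.filterMap pvPf) (fun x => x) false = []) := by
  rw [pv_foldl_eq_counter, PySem.Dict.items_counter, PySem.List.sorted_eq_nil_iff,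
    List.map_eq_nil_iff]
  constructor
  · intro h
    cases hps : ks.filterMap pvPf with
    | nil => rfl
    | cons x xs =>
        rw [hps, PySem.Set.ofList_cons] at h
        exact absurd h (by simp)
  · intro h; rw [h]; rfl

-- ===== VERDICT (by name: the statement is the Claim_ definition above) =====
theorem build_debug_log_success_py_spec : Claim_equal_build_debug_log_success_py := by
  intro metadata operation _
  unfold Spec_build_debug_log_success_py
  unfold build_debug_log_success_py build_debug_log_success_py_alt
  cases hr : PySem.Str.startswith operation "Read" with
  | false => simp
  | true =>
      simp only [if_true]
      by_cases hg : ((PySem.Dict.ofList metadata).keys.foldl pvAccA PySem.Dict.empty).items = []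
      · rw [if_pos hg, if_pos ((pv_guard_eq _).1 hg)]
      · rw [if_neg hg, if_neg (fun h => hg ((pv_guard_eq _).2 h)),
          pv_groups_eq ((PySem.Dict.ofList metadata).keys)]
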